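-- pv_equiv track=rewrite | github.com/Geforce132/Flashbot | main.py | get_strategy_vark_counts
-- ===== SOURCE A (Python) =====
-- def get_strategy_vark_counts(strats):
--     counts = dict(V=0, A=0, R=0, K=0)
--
--     for i in strats:
--         if 'V' in i['vark']:
--             counts['V'] += 1
--
--         if 'A' in i['vark']:
--             counts['A'] += 1
--
--         if 'R' in i['vark']:
--             counts['R'] += 1
--
--         if 'K' in i['vark']:
--             counts['K'] += 1
--
--     return counts
-- ===== SOURCE B (Python) =====
-- def get_strategy_vark_counts(strats):
--     # Transposed iteration: outer loop over the four letters, inner scan counting.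
--     counts = {}
--     for letter in ('V', 'A', 'R', 'K'):
--         n = 0
--         for i in strats:
--             if letter in i['vark']:
--                 n += 1
--         counts[letter] = n
--     return counts
-- ===== Notes on version B (the rewrite author's own statement) =====
-- stated objective: alternative
-- what changed: Transposed the nested iteration: B loops over the four letters V,A,R,K and for each makes a separate counting pass over strats, building the result dict letter by letter, instead of A's single pass updating four pre-initialized dict entries inline.
import Mathlib
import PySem

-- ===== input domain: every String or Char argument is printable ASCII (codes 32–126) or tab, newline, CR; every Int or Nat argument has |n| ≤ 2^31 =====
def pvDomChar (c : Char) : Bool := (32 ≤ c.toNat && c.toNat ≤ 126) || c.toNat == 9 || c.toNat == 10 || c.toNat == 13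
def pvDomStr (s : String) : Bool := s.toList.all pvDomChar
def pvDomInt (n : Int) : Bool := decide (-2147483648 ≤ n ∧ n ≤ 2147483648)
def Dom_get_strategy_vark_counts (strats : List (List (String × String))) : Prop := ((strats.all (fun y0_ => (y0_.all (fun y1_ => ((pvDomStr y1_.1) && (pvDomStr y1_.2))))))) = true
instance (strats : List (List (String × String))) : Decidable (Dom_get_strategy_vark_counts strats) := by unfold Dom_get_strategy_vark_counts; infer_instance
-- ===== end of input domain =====

-- B transposes A's loops: outer loop over the letters V,A,R,K, inner counting pass over strats.
-- Equivalence is about the RETURN value; neither program mutates its argument.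

-- ===== PORT A =====
-- i['vark'] raises KeyError when absent; Pre_ excludes that, so the getD "" default is never taken on admitted inputs.
def stepA (counts : PySem.Dict String Int) (i : List (String × String)) : PySem.Dict String Int :=
  let vark := ((PySem.Dict.mk i).get? "vark").getD ""
  let counts := if PySem.Str.isIn "V" vark then counts.modify "V" 0 (· + 1) else counts
  let counts := if PySem.Str.isIn "A" vark then counts.modify "A" 0 (· + 1) else counts
  let counts := if PySem.Str.isIn "R" vark then counts.modify "R" 0 (· + 1) else counts
  let counts := if PySem.Str.isIn "K" vark then counts.modify "K" 0 (· + 1) else counts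
  counts

def get_strategy_vark_counts (strats : List (List (String × String))) : List (String × Int) :=
  (strats.foldl stepA
    (PySem.Dict.ofList [("V", (0 : Int)), ("A", 0), ("R", 0), ("K", 0)])).items

-- ===== PORT B =====
def bCount (strats : List (List (String × String))) (letter : String) : Int :=
  strats.foldl
    (fun n i => if PySem.Str.isIn letter (((PySem.Dict.mk i).get? "vark").getD "") then n + 1 else n) 0

def get_strategy_vark_counts_alt (strats : List (List (String × String))) : List (String × Int) :=
  (["V", "A", "R", "K"].foldl
    (fun d letter => d.insert letter (bCount strats letter)) PySem.Dict.empty).items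

-- ===== PRECONDITION & SPEC =====
-- Pre_ excludes exactly the inputs where some strategy dict lacks the key 'vark' (Python raises KeyError there).
def Pre_get_strategy_vark_counts (strats : List (List (String × String))) : Prop :=
  ∀ i ∈ strats, (PySem.Dict.mk i).contains "vark" = true
instance (strats : List (List (String × String))) : Decidable (Pre_get_strategy_vark_counts strats) := by
  unfold Pre_get_strategy_vark_counts; infer_instance
def pvWitness_get_strategy_vark_counts : (List (List (String × String))) := [[("vark", "VA")]]

def Spec_get_strategy_vark_counts (strats : List (List (String × String))) (out : List (String × Int)) : Prop := out = get_strategy_vark_counts_alt strats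
instance (strats : List (List (String × String))) (out : List (String × Int)) : Decidable (Spec_get_strategy_vark_counts strats out) := by unfold Spec_get_strategy_vark_counts; infer_instance

-- ===== CLAIM (what is proved, stated in full; the proofs are below) =====
def Claim_equal_get_strategy_vark_counts : Prop := ∀ (strats : List (List (String × String))), Dom_get_strategy_vark_counts strats → Pre_get_strategy_vark_counts strats → Spec_get_strategy_vark_counts strats (get_strategy_vark_counts strats)

-- ===== LEMMAS AND PROOFS =====

lemma bCount_shift (strats : List (List (String × String))) (letter : String) (n : Int) :
    strats.foldl
      (fun n i => if PySem.Str.isIn letter (((PySem.Dict.mk i).get? "vark").getD "") then n + 1 else n) n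
    = n + bCount strats letter := by
  induction strats generalizing n with
  | nil => simp [bCount]
  | cons i rest ih =>
    simp only [bCount, List.foldl_cons]
    rw [ih, ih]
    split <;> ring

lemma stepA_literal (a b r k : Int) (i : List (String × String)) :
    stepA (PySem.Dict.mk [("V", a), ("A", b), ("R", r), ("K", k)]) i =
      PySem.Dict.mk
        [("V", a + if PySem.Str.isIn "V" (((PySem.Dict.mk i).get? "vark").getD "") then 1 else 0),
         ("A", b + if PySem.Str.isIn "A" (((PySem.Dict.mk i).get? "vark").getD "") then 1 else 0),
         ("R", r + if PySem.Str.isIn "R" (((PySem.Dict.mk i).get? "vark").getD "") then 1 else 0),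
         ("K", k + if PySem.Str.isIn "K" (((PySem.Dict.mk i).get? "vark").getD "") then 1 else 0)] := by
  have mV : ∀ a b r k : Int, (PySem.Dict.mk [("V", a), ("A", b), ("R", r), ("K", k)]).modify "V" 0 (· + 1)
      = PySem.Dict.mk [("V", a + 1), ("A", b), ("R", r), ("K", k)] := by
    intro a b r k; apply PySem.Dict.ext
    simp [PySem.Dict.modify, PySem.Dict.insert, PySem.Dict.contains, PySem.Dict.getD, PySem.Dict.get?]
  have mA : ∀ a b r k : Int, (PySem.Dict.mk [("V", a), ("A", b), ("R", r), ("K", k)]).modify "A" 0 (· + 1)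
      = PySem.Dict.mk [("V", a), ("A", b + 1), ("R", r), ("K", k)] := by
    intro a b r k; apply PySem.Dict.ext
    simp [PySem.Dict.modify, PySem.Dict.insert, PySem.Dict.contains, PySem.Dict.getD, PySem.Dict.get?]
  have mR : ∀ a b r k : Int, (PySem.Dict.mk [("V", a), ("A", b), ("R", r), ("K", k)]).modify "R" 0 (· + 1)
      = PySem.Dict.mk [("V", a), ("A", b), ("R", r + 1), ("K", k)] := by
    intro a b r k; apply PySem.Dict.ext
    simp [PySem.Dict.modify, PySem.Dict.insert, PySem.Dict.contains, PySem.Dict.getD, PySem.Dict.get?]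
  have mK : ∀ a b r k : Int, (PySem.Dict.mk [("V", a), ("A", b), ("R", r), ("K", k)]).modify "K" 0 (· + 1)
      = PySem.Dict.mk [("V", a), ("A", b), ("R", r), ("K", k + 1)] := by
    intro a b r k; apply PySem.Dict.ext
    simp [PySem.Dict.modify, PySem.Dict.insert, PySem.Dict.contains, PySem.Dict.getD, PySem.Dict.get?]
  simp only [stepA]
  split_ifs <;> simp only [mV, mA, mR, mK, add_zero]

lemma foldA_literal (strats : List (List (String × String))) (a b r k : Int) :
    strats.foldl stepA (PySem.Dict.mk [("V", a), ("A", b), ("R", r), ("K", k)]) =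
      PySem.Dict.mk
        [("V", a + bCount strats "V"), ("A", b + bCount strats "A"),
         ("R", r + bCount strats "R"), ("K", k + bCount strats "K")] := by
  induction strats generalizing a b r k with
  | nil => simp [bCount]
  | cons i rest ih =>
    rw [List.foldl_cons, stepA_literal, ih]
    have h : ∀ l : String, bCount (i :: rest) l =
        (if PySem.Str.isIn l (((PySem.Dict.mk i).get? "vark").getD "") then (1 : Int) else 0) + bCount rest l := by
      intro l
      simp only [bCount, List.foldl_cons]
      split
      · rw [bCount_shift]; simp [bCount]
      · simp [bCount]
    rw [h "V", h "A", h "R", h "K"]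
    simp only [add_assoc]

lemma alt_literal (strats : List (List (String × String))) :
    get_strategy_vark_counts_alt strats =
      [("V", bCount strats "V"), ("A", bCount strats "A"),
       ("R", bCount strats "R"), ("K", bCount strats "K")] := rfl

-- ===== VERDICT (by name: the statement is the Claim_ definition above) =====
theorem get_strategy_vark_counts_spec : Claim_equal_get_strategy_vark_counts := by
  intro strats _ _
  show _ = _
  rw [alt_literal]
  unfold get_strategy_vark_counts
  rw [show PySem.Dict.ofList [("V", (0 : Int)), ("A", 0), ("R", 0), ("K", 0)] =
      PySem.Dict.mk [("V", (0 : Int)), ("A", 0), ("R", 0), ("K", 0)] from rfl]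
  rw [foldA_literal]
  simp
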